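-- pv_equiv track=rewrite | github.com/HNU-yd/gene_details | src/utils/intervals.py | complement_intervals
-- ===== SOURCE A (Python) =====
-- from typing import List, Tuple
--
-- Interval = Tuple[int, int]
--
-- def merge_intervals(intervals: List[Interval]) -> List[Interval]:
--     if not intervals:
--         return []
--     intervals = sorted(intervals, key=lambda x: (x[0], x[1]))
--     out = []
--     s0, e0 = intervals[0]
--     for s, e in intervals[1:]:
--         if s <= e0 + 1:
--             e0 = max(e0, e)
--         else:
--             out.append((s0, e0))
--             s0, e0 = s, e
--     out.append((s0, e0))
--     return out
--
-- def complement_intervals(span: Interval, covered: List[Interval]) -> List[Interval]: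
--     s0, e0 = span
--     if s0 > e0:
--         return []
--     covered = merge_intervals([(max(s0,s), min(e0,e)) for s,e in covered if not (e < s0 or s > e0)])
--     out = []
--     cur = s0
--     for s, e in covered:
--         if cur < s:
--             out.append((cur, s-1))
--         cur = max(cur, e+1)
--     if cur <= e0:
--         out.append((cur, e0))
--     return out
-- ===== SOURCE B (Python) =====
-- from itertools import accumulate
--
-- def complement_intervals(span, covered):
--     s0, e0 = span
--     if s0 > e0:
--         return []
--     xs = sorted((max(s0, s), min(e0, e)) for s, e in covered if s <= e0 and e >= s0)
--     cuts = accumulate((e + 1 for _, e in xs), max, initial=s0)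
--     nexts = [s for s, _ in xs] + [e0 + 1]
--     return [(c, n - 1) for c, n in zip(cuts, nexts) if c < n]
-- ===== Notes on version B (the rewrite author's own statement) =====
-- stated objective: simpler
-- what changed: B drops A's interval-merging pass entirely: it clips and sorts, then derives the gaps in closed form as a running-max scan (itertools.accumulate) of end+1 cut points zipped against the next start points, a filter-comprehension instead of A's merge loop plus accumulator walk.
import Mathlib
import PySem

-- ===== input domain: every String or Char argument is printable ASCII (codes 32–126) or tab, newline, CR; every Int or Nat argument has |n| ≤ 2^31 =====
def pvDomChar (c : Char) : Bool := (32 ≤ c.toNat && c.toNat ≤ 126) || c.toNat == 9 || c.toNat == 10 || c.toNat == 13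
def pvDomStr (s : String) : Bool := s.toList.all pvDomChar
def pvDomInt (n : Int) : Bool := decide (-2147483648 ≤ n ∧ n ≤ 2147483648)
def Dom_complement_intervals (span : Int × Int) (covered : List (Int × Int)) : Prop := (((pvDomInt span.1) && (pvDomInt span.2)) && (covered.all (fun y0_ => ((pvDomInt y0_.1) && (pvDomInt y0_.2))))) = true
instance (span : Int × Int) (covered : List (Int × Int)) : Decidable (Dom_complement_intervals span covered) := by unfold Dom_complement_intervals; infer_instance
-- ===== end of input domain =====

-- B replaces A's merge pass + accumulator walk with a sort plus a running-max scan/zip/filter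
-- comprehension (objective: simpler, same cost).

-- ===== PORT A =====

-- the 'for s, e in intervals[1:]' loop of merge_intervals, state (out, s0, e0)
def pvMergeLoop (out : List (Int × Int)) (s0 e0 : Int) : List (Int × Int) → List (Int × Int)
  | [] => out ++ [(s0, e0)]
  | (s, e) :: t =>
      if s ≤ e0 + 1 then pvMergeLoop out s0 (max e0 e) t
      else pvMergeLoop (out ++ [(s0, e0)]) s e t

def pvMergeIntervals (intervals : List (Int × Int)) : List (Int × Int) :=
  if intervals = [] then []
  else
    match PySem.List.sorted2 intervals (fun x => x.1) (fun x => x.2) with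
    | [] => []  -- unreachable: sorted of a nonempty list is nonempty
    | (s0, e0) :: rest => pvMergeLoop [] s0 e0 rest

-- the 'for s, e in covered' loop of complement_intervals, state (out, cur)
def pvCompLoop (out : List (Int × Int)) (cur : Int) : List (Int × Int) → List (Int × Int) × Int
  | [] => (out, cur)
  | (s, e) :: t =>
      pvCompLoop (if cur < s then out ++ [(cur, s - 1)] else out) (max cur (e + 1)) t

def complement_intervals (span : Int × Int) (covered : List (Int × Int)) : List (Int × Int) :=
  let s0 := span.1
  let e0 := span.2
  if s0 > e0 then []
  else
    let cov := pvMergeIntervals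
      ((covered.filter (fun p => !(p.2 < s0 || p.1 > e0))).map (fun p => (max s0 p.1, min e0 p.2)))
    let r := pvCompLoop [] s0 cov
    if r.2 ≤ e0 then r.1 ++ [(r.2, e0)] else r.1

-- ===== PORT B =====

def complement_intervals_alt (span : Int × Int) (covered : List (Int × Int)) : List (Int × Int) :=
  let s0 := span.1
  let e0 := span.2
  if s0 > e0 then []
  else
    let xs := PySem.List.sorted2
      ((covered.filter (fun p => p.1 ≤ e0 && s0 ≤ p.2)).map (fun p => (max s0 p.1, min e0 p.2)))
      (fun x => x.1) (fun x => x.2)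
    let cuts := List.scanl max s0 (xs.map (fun p => p.2 + 1))
    let nexts := xs.map (fun p => p.1) ++ [e0 + 1]
    ((cuts.zip nexts).filter (fun p => decide (p.1 < p.2))).map (fun p => (p.1, p.2 - 1))

-- ===== PRECONDITION & SPEC =====
def Spec_complement_intervals (span : Int × Int) (covered : List (Int × Int)) (out : List (Int × Int)) : Prop := out = complement_intervals_alt span covered
instance (span : Int × Int) (covered : List (Int × Int)) (out : List (Int × Int)) : Decidable (Spec_complement_intervals span covered out) := by unfold Spec_complement_intervals; infer_instance

-- ===== CLAIM (what is proved, stated in full; the proofs are below) =====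
def Claim_equal_complement_intervals : Prop := ∀ (span : Int × Int) (covered : List (Int × Int)), Dom_complement_intervals span covered → Spec_complement_intervals span covered (complement_intervals span covered)

-- ===== LEMMAS AND PROOFS =====

-- the gaps of a coverage list within [·, E], starting the cursor at cur
def pvGaps (E cur : Int) : List (Int × Int) → List (Int × Int)
  | [] => if cur ≤ E then [(cur, E)] else []
  | (s, e) :: t => (if cur < s then [(cur, s - 1)] else []) ++ pvGaps E (max cur (e + 1)) t

theorem pvMergeLoop_out (ys : List (Int × Int)) : ∀ out s0 e0,
    pvMergeLoop out s0 e0 ys = out ++ pvMergeLoop [] s0 e0 ys := by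
  induction ys with
  | nil => intro out s0 e0; simp [pvMergeLoop]
  | cons h t ih =>
      intro out s0 e0
      obtain ⟨s, e⟩ := h
      by_cases hc : s ≤ e0 + 1
      · simp only [pvMergeLoop, if_pos hc]; exact ih out s0 (max e0 e)
      · simp only [pvMergeLoop, if_neg hc, List.nil_append]
        rw [ih (out ++ [(s0, e0)]), ih [(s0, e0)]]
        simp

theorem pvCompLoop_char (E : Int) (ys : List (Int × Int)) : ∀ out cur,
    (if (pvCompLoop out cur ys).2 ≤ E then (pvCompLoop out cur ys).1 ++ [((pvCompLoop out cur ys).2, E)]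
     else (pvCompLoop out cur ys).1) = out ++ pvGaps E cur ys := by
  induction ys with
  | nil =>
      intro out cur
      simp only [pvCompLoop, pvGaps]
      split_ifs <;> simp
  | cons h t ih =>
      intro out cur
      obtain ⟨s, e⟩ := h
      by_cases hc : cur < s
      · simp only [pvCompLoop, if_pos hc, pvGaps]
        rw [ih (out ++ [(cur, s - 1)]) (max cur (e + 1))]
        simp
      · simp only [pvCompLoop, if_neg hc, pvGaps]
        rw [ih out (max cur (e + 1))]
        simp

theorem pvGaps_mergeLoop (E : Int) (ys : List (Int × Int)) : ∀ p q cur,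
    pvGaps E cur (pvMergeLoop [] p q ys) = pvGaps E cur ((p, q) :: ys) := by
  induction ys with
  | nil => intro p q cur; simp [pvMergeLoop, pvGaps]
  | cons h t ih =>
      intro p q cur
      obtain ⟨s, e⟩ := h
      by_cases hc : s ≤ q + 1
      · have h1 : pvMergeLoop [] p q ((s, e) :: t) = pvMergeLoop [] p (max q e) t := by
          simp only [pvMergeLoop, if_pos hc]
        rw [h1, ih]
        have hns : ¬ (max cur (q + 1) < s) := by omega
        have harg : max (max cur (q + 1)) (e + 1) = max cur (max q e + 1) := by omega
        simp only [pvGaps, if_neg hns, List.nil_append, harg]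
      · have h2 : pvMergeLoop [] p q ((s, e) :: t) = (p, q) :: pvMergeLoop [] s e t := by
          simp only [pvMergeLoop, if_neg hc, List.nil_append]
          rw [pvMergeLoop_out t [(p, q)] s e]
          rfl
        rw [h2]
        simp only [pvGaps, ih]

theorem pvScan_char (E : Int) (ys : List (Int × Int)) : ∀ cur,
    (((List.scanl max cur (ys.map (fun p => p.2 + 1))).zip (ys.map (fun p => p.1) ++ [E + 1])).filter
        (fun p => decide (p.1 < p.2))).map (fun p => (p.1, p.2 - 1)) = pvGaps E cur ys := by
  induction ys with
  | nil =>
      intro cur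
      by_cases hc : cur ≤ E
      · simp [List.scanl_nil, pvGaps, hc, show cur < E + 1 from by omega]
      · simp [List.scanl_nil, pvGaps, hc, show ¬ cur < E + 1 from by omega]
  | cons h t ih =>
      intro cur
      obtain ⟨s, e⟩ := h
      by_cases hc : cur < s <;>
        simp [List.scanl_cons, pvGaps, hc, ih]

-- ===== VERDICT (by name: the statement is the Claim_ definition above) =====
theorem complement_intervals_spec : Claim_equal_complement_intervals := by
  unfold Claim_equal_complement_intervals
  intro span covered _
  unfold Spec_complement_intervals complement_intervals complement_intervals_alt
  obtain ⟨s0, e0⟩ := span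
  simp only
  by_cases hs : s0 > e0
  · simp [hs]
  · simp only [if_neg hs]
    have hfilter : covered.filter (fun p => !(p.2 < s0 || p.1 > e0))
        = covered.filter (fun p => p.1 ≤ e0 && s0 ≤ p.2) := by
      apply List.filter_congr
      intro p _
      by_cases h1 : p.1 ≤ e0 <;> by_cases h2 : s0 ≤ p.2 <;>
        simp [h1, h2] <;> omega
    rw [hfilter]
    set clipped := (covered.filter (fun p => p.1 ≤ e0 && s0 ≤ p.2)).map
      (fun p => (max s0 p.1, min e0 p.2)) with hcl
    rw [pvScan_char]
    by_cases hnil : clipped = []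
    · rw [hnil]
      have hsnil : PySem.List.sorted2 ([] : List (Int × Int)) (fun x => x.1) (fun x => x.2) = [] := by
        rfl
      rw [hsnil]
      simp [pvMergeIntervals, pvCompLoop, pvGaps]
    · have hsn : PySem.List.sorted2 clipped (fun x => x.1) (fun x => x.2) ≠ [] := by
        intro hcon
        have hp := (PySem.List.sorted2_perm (xs := clipped) (k1 := fun x => x.1)
          (k2 := fun x => x.2) (rev := false)).length_eq
        rw [hcon] at hp
        exact hnil (List.length_eq_zero_iff.mp hp.symm)
      obtain ⟨⟨p, q⟩, rest, hsd⟩ : ∃ h t, PySem.List.sorted2 clipped (fun x => x.1) (fun x => x.2) = h :: t := by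
        cases hm : PySem.List.sorted2 clipped (fun x => x.1) (fun x => x.2) with
        | nil => exact absurd hm hsn
        | cons a b => exact ⟨a, b, rfl⟩
      have hmerge : pvMergeIntervals clipped = pvMergeLoop [] p q rest := by
        unfold pvMergeIntervals
        rw [if_neg hnil, hsd]
      rw [hmerge]
      have hcc := pvCompLoop_char e0 (pvMergeLoop [] p q rest) [] s0
      simp only [List.nil_append] at hcc
      rw [hcc, pvGaps_mergeLoop, ← hsd]
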